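-- pv_equiv track=rewrite | github.com/kangnathan/fibonacci_lucas_tribonacci | fib_luc_tri.py | find_in_tribonacci
-- ===== SOURCE A (Python) =====
-- def find_in_tribonacci(number):
--     tribonacci_sequence = [0, 1, 1]
--     while tribonacci_sequence[-1] < number:
--         next_number = tribonacci_sequence[-1] + tribonacci_sequence[-2] + tribonacci_sequence[-3]
--         tribonacci_sequence.append(next_number)
--     if number in tribonacci_sequence:
--         return tribonacci_sequence.index(number) + 1
--     else:
--         return -1
-- ===== SOURCE B (Python) =====
-- # Tribonacci grows exponentially, so every term that can match an input in the
-- # supported range is known in advance: one precomputed hash lookup replaces generation + scan.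
-- # (value -> first 1-based position; 1 occurs at positions 2 and 3, first kept)
-- _POS = {0: 1, 1: 2, 2: 4, 4: 5, 7: 6, 13: 7, 24: 8, 44: 9, 81: 10, 149: 11, 274: 12, 504: 13, 927: 14, 1705: 15, 3136: 16, 5768: 17, 10609: 18, 19513: 19, 35890: 20, 66012: 21, 121415: 22, 223317: 23, 410744: 24, 755476: 25, 1389537: 26, 2555757: 27, 4700770: 28, 8646064: 29, 15902591: 30, 29249425: 31, 53798080: 32, 98950096: 33, 181997601: 34, 334745777: 35, 615693474: 36, 1132436852: 37, 2082876103: 38, 3831006429: 39}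
--
--
-- def find_in_tribonacci(number):
--     return _POS.get(number, -1)
-- ===== Notes on version B (the rewrite author's own statement) =====
-- stated objective: alternative
-- what changed: B has no generation loop at all: because tribonacci grows exponentially, every term that can occur inside the bounded input domain is precomputed into a constant value-to-first-position dict, and the function is a single dict lookup with the not-found default, replacing A's build-a-list-while-last-is-small loop plus its two subsequent scans (membership test and list.index).
import Mathlib
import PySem

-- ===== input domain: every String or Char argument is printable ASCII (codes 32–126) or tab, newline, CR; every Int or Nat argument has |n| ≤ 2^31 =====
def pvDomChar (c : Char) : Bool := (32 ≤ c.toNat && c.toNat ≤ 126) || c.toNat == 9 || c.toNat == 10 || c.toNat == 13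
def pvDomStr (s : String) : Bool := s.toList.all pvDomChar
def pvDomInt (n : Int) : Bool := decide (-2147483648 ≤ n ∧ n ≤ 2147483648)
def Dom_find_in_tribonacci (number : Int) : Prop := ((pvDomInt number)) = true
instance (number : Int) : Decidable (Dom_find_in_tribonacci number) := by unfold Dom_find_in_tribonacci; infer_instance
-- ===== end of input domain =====

-- B replaces A's generate-a-list-then-scan-it-twice with a single lookup in a
-- precomputed value→position table covering the bounded input domain (objective: alternative).

-- ===== PORT A =====
-- A's while loop: the list is the state; fuel only guards totality (the loop runs at
-- most number.toNat times, proved in the lemmas below), the '.getD 0' only totalises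
-- the always-in-range negative indexing (the list always has ≥ 3 elements).
def tribLoopA (number : Int) : Nat → List Int → List Int
  | 0, seq => seq
  | fuel+1, seq =>
    if (PySem.List.pyGet? seq (-1)).getD 0 < number then
      let nxt := (PySem.List.pyGet? seq (-1)).getD 0 + (PySem.List.pyGet? seq (-2)).getD 0
                   + (PySem.List.pyGet? seq (-3)).getD 0
      tribLoopA number fuel (seq ++ [nxt])
    else seq

def find_in_tribonacci (number : Int) : Int :=
  let seq := tribLoopA number (number.toNat + 1) [0, 1, 1]
  if number ∈ seq then (((PySem.List.index? seq number).getD 0 : Nat) : Int) + 1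
  else -1

-- ===== PORT B =====
-- the Python module constant _POS: value → first 1-based position, all tribonacci
-- terms that can match an in-domain input
def pvPOS : PySem.Dict Int Int := PySem.Dict.ofList [(0, 1), (1, 2), (2, 4), (4, 5), (7, 6), (13, 7), (24, 8), (44, 9), (81, 10), (149, 11), (274, 12), (504, 13), (927, 14), (1705, 15), (3136, 16), (5768, 17), (10609, 18), (19513, 19), (35890, 20), (66012, 21), (121415, 22), (223317, 23), (410744, 24), (755476, 25), (1389537, 26), (2555757, 27), (4700770, 28), (8646064, 29), (15902591, 30), (29249425, 31), (53798080, 32), (98950096, 33), (181997601, 34), (334745777, 35), (615693474, 36), (1132436852, 37), (2082876103, 38), (3831006429, 39)]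

def find_in_tribonacci_alt (number : Int) : Int :=
  PySem.Dict.getD pvPOS number (-1)

-- ===== PRECONDITION & SPEC =====
def Spec_find_in_tribonacci (number : Int) (out : Int) : Prop := out = find_in_tribonacci_alt number
instance (number : Int) (out : Int) : Decidable (Spec_find_in_tribonacci number out) := by unfold Spec_find_in_tribonacci; infer_instance

-- ===== CLAIM (what is proved, stated in full; the proofs are below) =====
def Claim_equal_find_in_tribonacci : Prop := ∀ (number : Int), Dom_find_in_tribonacci number → Spec_find_in_tribonacci number (find_in_tribonacci number)

-- ===== LEMMAS AND PROOFS =====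

-- the tribonacci prefix A can ever build for an in-domain input (proof-side ghost list)
def TRIB : List Int := [0, 1, 1, 2, 4, 7, 13, 24, 44, 81, 149, 274, 504, 927, 1705, 3136, 5768, 10609, 19513, 35890, 66012, 121415, 223317, 410744, 755476, 1389537, 2555757, 4700770, 8646064, 15902591, 29249425, 53798080, 98950096, 181997601, 334745777, 615693474, 1132436852, 2082876103, 3831006429]

-- the reference result: first 1-based position of number in TRIB, else -1
def lookupT (number : Int) : Int :=
  match PySem.List.index? TRIB number with
  | some i => (i : Int) + 1
  | none => -1

-- "each element is the sum of the previous three" as a checkable predicate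
def tribRec : List Int → Bool
  | a :: b :: c :: d :: t => (d == a + b + c) && tribRec (b :: c :: d :: t)
  | _ => true

lemma tribRec_tail (l : List Int) (x : Int) (h : tribRec (x :: l) = true) : tribRec l = true := by
  rcases l with _ | ⟨a, _ | ⟨b, _ | ⟨c, _ | ⟨d, t⟩⟩⟩⟩
  · rfl
  · rfl
  · rfl
  · rfl
  · simp [tribRec] at h ⊢
    exact ⟨h.2.1, h.2.2⟩

lemma tribRec_suffix (xs l : List Int) (h : tribRec (xs ++ l) = true) : tribRec l = true := by
  induction xs with
  | nil => exact h
  | cons x xs ih => exact ih (tribRec_tail _ x h)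

lemma tribRec_head (a b c d : Int) (t : List Int) (h : tribRec (a :: b :: c :: d :: t) = true) :
    d = a + b + c := by
  simp [tribRec] at h
  exact h.1

lemma tribRec_TRIB : tribRec TRIB = true := by decide

lemma pairwise_TRIB : TRIB.Pairwise (· ≤ ·) := by decide

lemma getLast?_TRIB : TRIB.getLast? = some 3831006429 := by decide

lemma nonneg_TRIB : ∀ x ∈ TRIB, 0 ≤ x := by decide

-- the three negative indexings on a list ending in [a, b, c]
lemma pyGet_last3 (pre : List Int) (a b c : Int) :
    PySem.List.pyGet? (pre ++ [a, b, c]) (-1) = some c ∧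
    PySem.List.pyGet? (pre ++ [a, b, c]) (-2) = some b ∧
    PySem.List.pyGet? (pre ++ [a, b, c]) (-3) = some a := by
  have hlen : (pre ++ [a, b, c]).length = pre.length + 3 := by simp
  refine ⟨?_, ?_, ?_⟩
  · rw [PySem.List.pyGet?_neg_ofNat _ 1 (by omega) (by omega)]
    rw [hlen]
    simp
  · rw [PySem.List.pyGet?_neg_ofNat _ 2 (by omega) (by omega)]
    rw [hlen]
    simp
  · rw [PySem.List.pyGet?_neg_ofNat _ 3 (by omega) (by omega)]
    rw [hlen]
    simp

-- once the last element fails the guard, A's loop stops for any fuel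
lemma tribLoopA_stop (number d : Int) (l : List Int) (hd : PySem.List.pyGet? l (-1) = some d)
    (h : ¬ d < number) : ∀ fuel, tribLoopA number fuel l = l := by
  intro fuel
  cases fuel with
  | zero => rfl
  | succ f => simp [tribLoopA, hd, h]

-- B's table agrees with first-position lookup in TRIB everywhere
set_option maxRecDepth 8192 in
lemma alt_eq_lookupT (number : Int) : find_in_tribonacci_alt number = lookupT number := by
  by_cases h : number ∈ TRIB
  · fin_cases h <;> decide
  · have hnone : PySem.List.index? TRIB number = none :=
      (PySem.List.index?_eq_none_iff _ _).mpr h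
    simp only [TRIB, List.mem_cons, List.not_mem_nil, or_false] at h
    simp only [not_or] at h
    have hk : PySem.Dict.get? pvPOS number = none := by
      rw [PySem.Dict.get?_eq_none_iff_not_mem_keys]
      intro hm
      have hkeys : pvPOS.keys = [0, 1, 2, 4, 7, 13, 24, 44, 81, 149, 274, 504, 927, 1705, 3136, 5768, 10609, 19513, 35890, 66012, 121415, 223317, 410744, 755476, 1389537, 2555757, 4700770, 8646064, 15902591, 29249425, 53798080, 98950096, 181997601, 334745777, 615693474, 1132436852, 2082876103, 3831006429] := by decide
      rw [hkeys] at hm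
      simp only [List.mem_cons, List.not_mem_nil, or_false] at hm
      omega
    unfold find_in_tribonacci_alt lookupT
    rw [hnone, PySem.Dict.getD, hk]
    rfl

-- the aligned invariant: A's list is pre ++ [a, b, c], a known prefix of TRIB, with
-- every element so far below number; A's remaining run returns lookupT number
lemma key : ∀ (fuel : Nat) (number : Int) (pre : List Int) (a b c : Int) (rest : List Int),
    2 ≤ number → number ≤ 2147483648 → c < number → 0 ≤ a → a ≤ b → 1 ≤ b → b ≤ c →
    (∀ x ∈ pre, x < number) →
    TRIB = (pre ++ [a, b, c]) ++ rest →
    (number - c).toNat < fuel →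
    (if number ∈ tribLoopA number fuel (pre ++ [a, b, c]) then
        (((PySem.List.index? (tribLoopA number fuel (pre ++ [a, b, c])) number).getD 0 : Nat) : Int) + 1
      else -1)
      = lookupT number := by
  intro fuel
  induction fuel with
  | zero => intro number pre a b c rest _ _ _ _ _ _ _ _ _ hf; omega
  | succ f ih =>
    intro number pre a b c rest h2 hub hc ha0 hab hb1 hbc hpre hT hf
    obtain ⟨g1, g2, g3⟩ := pyGet_last3 pre a b c
    have habc : c + b + a = a + b + c := by ring
    have hnotin : number ∉ pre ++ [a, b, c] := by
      intro hmem
      rcases List.mem_append.mp hmem with h | h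
      · exact lt_irrefl number (hpre _ h)
      · simp at h; omega
    rcases rest with _ | ⟨r, rs⟩
    · -- impossible: c would be TRIB's last element 3831006429 > number
      exfalso
      simp only [List.append_nil] at hT
      have hlast : TRIB.getLast? = some c := by
        rw [hT, show pre ++ [a, b, c] = (pre ++ [a, b]) ++ [c] by simp]
        exact List.getLast?_concat
      rw [getLast?_TRIB] at hlast
      have : c = 3831006429 := by injection hlast with h; omega
      omega
    · have hT' : TRIB = pre ++ a :: b :: c :: r :: rs := by
        simpa using hT
      have hr : r = a + b + c :=
        tribRec_head a b c r rs (tribRec_suffix pre _ (by rw [← hT']; exact tribRec_TRIB))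
      have hA : tribLoopA number (f + 1) (pre ++ [a, b, c])
          = tribLoopA number f ((pre ++ [a, b, c]) ++ [c + b + a]) := by
        simp [tribLoopA, g1, g2, g3, hc]
      have hlast : PySem.List.pyGet? ((pre ++ [a, b, c]) ++ [c + b + a]) (-1) = some (c + b + a) := by
        have := (pyGet_last3 (pre ++ [a]) b c (c + b + a)).1
        simpa using this
      by_cases h1 : a + b + c = number
      · -- A stops with number as the freshly appended last element
        have hstop := tribLoopA_stop number (c + b + a) _ hlast (by omega) f
        rw [hA, hstop]
        have hmem : number ∈ (pre ++ [a, b, c]) ++ [c + b + a] := by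
          simp [habc, h1]
        rw [if_pos hmem]
        have hidx : PySem.List.index? ((pre ++ [a, b, c]) ++ [c + b + a]) number
            = some (pre.length + 3) := by
          have he : (c + b + a) = number := by omega
          rw [he, PySem.List.index?_append_singleton_self _ _ hnotin]
          simp
        rw [hidx]
        have hidxT : PySem.List.index? TRIB number = some (pre.length + 3) := by
          rw [PySem.List.index?_eq_some_iff]
          exact ⟨pre ++ [a, b, c], rs, by rw [hT', hr, h1]; simp, by simp, hnotin⟩
        unfold lookupT
        rw [hidxT]
        simp
      · by_cases hgt : a + b + c > number
        · -- A stops; number is in neither A's final list nor TRIB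
          have hstop := tribLoopA_stop number (c + b + a) _ hlast (by omega) f
          rw [hA, hstop]
          have hmemA : number ∉ (pre ++ [a, b, c]) ++ [c + b + a] := by
            intro hmem
            rcases List.mem_append.mp hmem with h | h
            · exact hnotin h
            · simp at h; omega
          rw [if_neg hmemA]
          have hpw : (r :: rs).Pairwise (· ≤ ·) := by
            have := pairwise_TRIB
            rw [hT] at this
            exact (List.pairwise_append.mp this).2.1
          have hrs : ∀ x ∈ rs, r ≤ x := (List.pairwise_cons.mp hpw).1
          have hmemT : number ∉ TRIB := by
            rw [hT]
            intro hmem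
            rcases List.mem_append.mp hmem with h | h
            · exact hnotin h
            · rcases List.mem_cons.mp h with h | h
              · omega
              · have := hrs _ h; omega
          unfold lookupT
          rw [(PySem.List.index?_eq_none_iff _ _).mpr hmemT]
        · -- both the loop and the TRIB prefix advance in lockstep
          have hlt : a + b + c < number := by omega
          have harr : (pre ++ [a, b, c]) ++ [c + b + a] = (pre ++ [a]) ++ [b, c, a + b + c] := by
            simp [habc]
          have hT2 : TRIB = ((pre ++ [a]) ++ [b, c, a + b + c]) ++ rs := by
            rw [hT', hr]; simp
          have ihx := ih number (pre ++ [a]) b c (a + b + c) rs h2 hub hlt (by omega) hbc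
            (by omega) (by omega)
            (by intro x hx; rcases List.mem_append.mp hx with h | h
                · exact hpre _ h
                · simp at h; omega)
            hT2 (by omega)
          rw [hA, harr, ihx]

-- ===== VERDICT (by name: the statement is the Claim_ definition above) =====
theorem find_in_tribonacci_spec : Claim_equal_find_in_tribonacci := by
  intro number hdom
  unfold Spec_find_in_tribonacci
  rw [alt_eq_lookupT]
  by_cases h0 : number = 0
  · subst h0; decide
  · by_cases h1 : number = 1
    · subst h1; decide
    · by_cases hneg : number < 0
      · have ht : number.toNat = 0 := by omega
        have hm : number ∉ ([0, 1, 1] : List Int) := by simp; omega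
        have hmT : number ∉ TRIB := fun hmem => absurd (nonneg_TRIB _ hmem) (by omega)
        have hg : (PySem.List.pyGet? ([0, 1, 1] : List Int) (-1)).getD 0 = 1 := by decide
        unfold find_in_tribonacci lookupT
        rw [(PySem.List.index?_eq_none_iff _ _).mpr hmT]
        simp [tribLoopA, hg, show ¬ (1 : Int) < number by omega, hm]
      · have h2 : 2 ≤ number := by omega
        have hub : number ≤ 2147483648 := by
          have := of_decide_eq_true hdom
          omega
        have hkey := key (number.toNat + 1) number [] 0 1 1
          [2, 4, 7, 13, 24, 44, 81, 149, 274, 504, 927, 1705, 3136, 5768, 10609, 19513, 35890, 66012, 121415, 223317, 410744, 755476, 1389537, 2555757, 4700770, 8646064, 15902591, 29249425, 53798080, 98950096, 181997601, 334745777, 615693474, 1132436852, 2082876103, 3831006429]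
          h2 hub (by omega) (by omega) (by omega) (by omega) (by omega) (by simp)
          (by decide) (by omega)
        simp only [List.nil_append] at hkey
        unfold find_in_tribonacci
        exact hkey
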